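-- pv_equiv track=rewrite | github.com/steve-sanogo/RxPersonna | graph_builder.py | clean_names_for_submission
-- ===== SOURCE A (Python) =====
-- def clean_names_for_submission(alias_list):
--     """
--     Choisit et formate les meilleurs noms (labels) pour l'export GraphML.
--     """
--     unique_names = list(set(alias_list))
--
--     def sort_key(name):
--         has_cap = any(c.isupper() for c in name)
--         return (-len(name), not has_cap, name)
--
--     sorted_candidates = sorted(unique_names, key=sort_key)
--     final_names = []
--     seen_lower = set()
--     for name in sorted_candidates:
--         low = name.lower()
--         if low not in seen_lower:
--             final_names.append(name)
--             seen_lower.add(low)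
--     return ";".join(final_names)
-- ===== SOURCE B (Python) =====
-- def clean_names_for_submission(alias_list):
--     def sort_key(name):
--         has_cap = any(c.isupper() for c in name)
--         return (-len(name), not has_cap, name)
--
--     best = {}
--     for name in alias_list:
--         low = name.lower()
--         cur = best.get(low)
--         if cur is None or sort_key(name) < sort_key(cur):
--             best[low] = name
--     return ";".join(sorted(best.values(), key=sort_key))
-- ===== Notes on version B (the rewrite author's own statement) =====
-- stated objective: alternative
-- what changed: A deduplicates via set(), sorts every unique name, then scans linearly deduplicating by lowercase; B instead folds the input once into a dict mapping each name.lower() to the sort_key-minimal representative of that group and sorts only the representatives.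
import Mathlib
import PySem

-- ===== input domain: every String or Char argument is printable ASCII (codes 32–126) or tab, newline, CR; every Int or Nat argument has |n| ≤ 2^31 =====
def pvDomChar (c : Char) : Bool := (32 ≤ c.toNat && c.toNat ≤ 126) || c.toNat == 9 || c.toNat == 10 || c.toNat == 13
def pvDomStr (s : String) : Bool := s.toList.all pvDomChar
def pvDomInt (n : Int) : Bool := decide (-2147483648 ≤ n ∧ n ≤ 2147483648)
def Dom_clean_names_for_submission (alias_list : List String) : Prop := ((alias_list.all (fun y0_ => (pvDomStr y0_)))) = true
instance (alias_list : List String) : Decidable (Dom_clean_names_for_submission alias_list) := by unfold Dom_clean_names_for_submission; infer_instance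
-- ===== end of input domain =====

-- B replaces A's "dedup via set, sort everything, then scan deduping by lowercase" with
-- "group by lowercase into a dict keeping the sort_key-minimal representative, then sort
-- only the representatives" (objective: alternative decomposition; same result).
-- Both Python sources define the identical local tuple key sort_key(name) = (-len(name), not has_cap, name);
-- it is ported once as `skey`.  The (-len(name), not has_cap) prefix of the tuple is encoded as the
-- single integer -2*len(name) + (1 if not has_cap else 0): the second component is 0/1, so this
-- encoding is strictly order-isomorphic to the lexicographic pair order — the total key order
-- (and hence all sorting and min-selection behaviour) is exact.

-- ===== PORT A =====
def skey (name : String) : Int ×ₗ String :=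
  toLex (-2 * PySem.Str.len name + (if name.toList.any PySem.Str.isupper then 0 else 1), name)

def clean_names_for_submission (alias_list : List String) : String :=
  -- unique_names = list(set(alias_list)); sorted(unique_names, key=sort_key); then the
  -- dedup-by-lowercase scan.  sort_key is injective (its last component is name itself),
  -- so sorted(...) — and hence the result — does not depend on the set's iteration order.
  PySem.Str.join ";"
    ((PySem.List.sorted (PySem.Set.ofList alias_list) skey false).foldl
      (fun (st : List String × PySem.Set String) name =>
        if PySem.Set.contains st.2 (PySem.Str.lower name) then st
        else (st.1 ++ [name], st.2.add (PySem.Str.lower name)))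
      ([], PySem.Set.empty)).1

-- ===== PORT B =====
-- one step of B's loop: keep, per lowercase form, the sort_key-minimal name seen so far
def bstep (d : PySem.Dict String String) (name : String) : PySem.Dict String String :=
  match d.get? (PySem.Str.lower name) with
  | none => d.insert (PySem.Str.lower name) name
  | some cur => if skey name < skey cur then d.insert (PySem.Str.lower name) name else d

def clean_names_for_submission_alt (alias_list : List String) : String :=
  PySem.Str.join ";"
    (PySem.List.sorted (alias_list.foldl bstep PySem.Dict.empty).values skey false)

-- ===== PRECONDITION & SPEC =====
def Spec_clean_names_for_submission (alias_list : List String) (out : String) : Prop := out = clean_names_for_submission_alt alias_list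
instance (alias_list : List String) (out : String) : Decidable (Spec_clean_names_for_submission alias_list out) := by unfold Spec_clean_names_for_submission; infer_instance

-- ===== CLAIM (what is proved, stated in full; the proofs are below) =====
def Claim_equal_clean_names_for_submission : Prop := ∀ (alias_list : List String), Dom_clean_names_for_submission alias_list → Spec_clean_names_for_submission alias_list (clean_names_for_submission alias_list)

-- ===== LEMMAS AND PROOFS =====

def KMin (xs : List String) (x : String) : Prop :=
  ∀ y ∈ xs, PySem.Str.lower y = PySem.Str.lower x → skey x ≤ skey y
def scanDedup (seen : PySem.Set String) : List String → List String
  | [] => []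
  | n :: t =>
    if PySem.Set.contains seen (PySem.Str.lower n) then scanDedup seen t
    else n :: scanDedup (seen.add (PySem.Str.lower n)) t

theorem scanDedup_mem (S : List String) (seen : PySem.Set String)
    (hnd : S.Nodup) (hpw : S.Pairwise (fun a b => skey a < skey b)) (x : String) :
    x ∈ scanDedup seen S ↔ x ∈ S ∧ PySem.Str.lower x ∉ seen ∧ KMin S x := by
  induction S generalizing seen with
  | nil => simp [scanDedup, KMin]
  | cons n t ih =>
    rw [List.nodup_cons] at hnd
    rw [List.pairwise_cons] at hpw
    rw [scanDedup]
    by_cases h : PySem.Set.contains seen (PySem.Str.lower n) = true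
    · rw [if_pos h, ih seen hnd.2 hpw.2]
      rw [PySem.Set.contains_iff] at h
      constructor
      · rintro ⟨ht, hs, hm⟩
        refine ⟨List.mem_cons_of_mem n ht, hs, ?_⟩
        intro y hy hl
        rcases List.mem_cons.1 hy with rfl | hy'
        · exact absurd (hl ▸ h) hs
        · exact hm y hy' hl
      · rintro ⟨hmem, hs, hm⟩
        rcases List.mem_cons.1 hmem with rfl | hx
        · exact absurd h hs
        · exact ⟨hx, hs, fun y hy hl => hm y (List.mem_cons_of_mem n hy) hl⟩
    · rw [if_neg h]
      rw [PySem.Set.contains_iff] at h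
      rw [List.mem_cons, ih (seen.add (PySem.Str.lower n)) hnd.2 hpw.2]
      constructor
      · rintro (rfl | ⟨ht, hs, hm⟩)
        · refine ⟨List.mem_cons_self, h, ?_⟩
          intro y hy hl
          rcases List.mem_cons.1 hy with rfl | hy'
          · exact le_refl _
          · exact le_of_lt (hpw.1 y hy')
        · rw [PySem.Set.mem_add] at hs
          rw [not_or] at hs
          refine ⟨List.mem_cons_of_mem n ht, hs.1, ?_⟩
          intro y hy hl
          rcases List.mem_cons.1 hy with rfl | hy'
          · exact absurd hl (fun e => hs.2 e.symm)
          · exact hm y hy' hl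
      · rintro ⟨hmem, hs, hm⟩
        rcases List.mem_cons.1 hmem with rfl | hx
        · exact Or.inl rfl
        · refine Or.inr ⟨hx, ?_, fun y hy hl => hm y (List.mem_cons_of_mem n hy) hl⟩
          rw [PySem.Set.mem_add, not_or]
          refine ⟨hs, fun e => ?_⟩
          have h1 := hm n List.mem_cons_self e.symm
          exact absurd (hpw.1 x hx) (not_lt.2 h1)


def DInv (pref : List String) (l : List (String × String)) : Prop :=
  (∀ p ∈ l, p.1 = PySem.Str.lower p.2 ∧ p.2 ∈ pref ∧
      ∀ y ∈ pref, PySem.Str.lower y = p.1 → skey p.2 ≤ skey y)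
  ∧ (∀ y ∈ pref, PySem.Str.lower y ∈ l.map Prod.fst)
  ∧ (l.map Prod.fst).Nodup

theorem dinv_step (pref : List String) (d : PySem.Dict String String) (n : String)
    (h : DInv pref d.items) : DInv (pref ++ [n]) (bstep d n).items := by
  obtain ⟨h1, h2, h3⟩ := h
  unfold bstep
  cases hg : d.get? (PySem.Str.lower n) with
  | none =>
    have hcon : d.contains (PySem.Str.lower n) = false := by
      rw [PySem.Dict.contains_eq_isSome_get?, hg]; rfl
    have hkeys : PySem.Str.lower n ∉ d.items.map Prod.fst := by
      intro hm
      rw [PySem.Dict.get?] at hg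
      rcases List.mem_map.1 hm with ⟨p, hp, hpe⟩
      have := List.find?_eq_none.1 (Option.map_eq_none_iff.1 hg) p hp
      simp [hpe] at this
    rw [PySem.Dict.insert, hcon]
    simp only [Bool.false_eq_true, if_neg, not_false_iff]
    refine ⟨?_, ?_, ?_⟩
    · intro p hp
      rcases List.mem_append.1 hp with hp' | hp'
      · obtain ⟨e1, e2, e3⟩ := h1 p hp'
        refine ⟨e1, List.mem_append_left _ e2, ?_⟩
        intro y hy hl
        rcases List.mem_append.1 hy with hy' | hy'
        · exact e3 y hy' hl
        · rw [List.mem_singleton.1 hy'] at hl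
          exact absurd (hl ▸ List.mem_map_of_mem (f := Prod.fst) hp') hkeys
      · rw [List.mem_singleton.1 hp']
        refine ⟨rfl, List.mem_append_right _ List.mem_cons_self, ?_⟩
        intro y hy hl
        rcases List.mem_append.1 hy with hy' | hy'
        · have hl' : PySem.Str.lower y = PySem.Str.lower n := hl
          exact absurd (hl' ▸ h2 y hy') hkeys
        · rw [List.mem_singleton.1 hy']
    · intro y hy
      rcases List.mem_append.1 hy with hy' | hy'
      · rw [List.map_append]
        exact List.mem_append_left _ (h2 y hy')
      · rw [List.mem_singleton.1 hy', List.map_append]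
        exact List.mem_append_right _ (by simp)
    · rw [List.map_append, List.nodup_append]
      refine ⟨h3, List.nodup_singleton _, ?_⟩
      intro a ha b hb
      simp only [List.map_cons, List.map_nil, List.mem_singleton] at hb
      intro e
      rw [e, hb] at ha
      exact hkeys ha
  | some cur =>
    have hcon : d.contains (PySem.Str.lower n) = true := by
      rw [PySem.Dict.contains_eq_isSome_get?, hg]; rfl
    obtain ⟨q, hqf, hq2⟩ := Option.map_eq_some_iff.1 (show Option.map (fun x => (x : String × String).2) (List.find? (fun p => p.1 == PySem.Str.lower n) d.items) = some cur from hg)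
    have hqmem : q ∈ d.items := List.mem_of_find?_eq_some hqf
    have hq1 : q.1 = PySem.Str.lower n := by
      have := List.find?_some hqf; simpa using this
    have hqmin := h1 q hqmem
    dsimp only
    by_cases hlt : skey n < skey cur
    · rw [if_pos hlt, PySem.Dict.insert, hcon, if_pos rfl]
      have hfst : ∀ p : String × String,
          ((if p.1 == PySem.Str.lower n then (PySem.Str.lower n, n) else p) : String × String).1 = p.1 := by
        intro p; by_cases hb : p.1 = PySem.Str.lower n <;> simp [hb]
      have hkeys_eq : (d.items.map (fun p => if p.1 == PySem.Str.lower n then (PySem.Str.lower n, n) else p)).map Prod.fst = d.items.map Prod.fst := by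
        rw [List.map_map]; exact List.map_congr_left (fun p _ => hfst p)
      refine ⟨?_, ?_, ?_⟩
      · intro p' hp'
        rcases List.mem_map.1 hp' with ⟨p, hp, hpe⟩
        by_cases hb : p.1 = PySem.Str.lower n
        · have hgb : (if p.1 == PySem.Str.lower n then (PySem.Str.lower n, n) else p) = (PySem.Str.lower n, n) := by
            simp [hb]
          rw [← hpe, hgb]
          refine ⟨rfl, List.mem_append_right _ List.mem_cons_self, ?_⟩
          intro y hy hl
          rcases List.mem_append.1 hy with hy' | hy'
          · have := hqmin.2.2 y hy' (by rw [hq1]; exact hl)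
            exact le_of_lt (lt_of_lt_of_le (hq2 ▸ hlt) this)
          · rw [List.mem_singleton.1 hy']
        · rw [← hpe]; simp only [hb, beq_iff_eq, if_neg, not_false_iff]
          obtain ⟨e1, e2, e3⟩ := h1 p hp
          refine ⟨e1, List.mem_append_left _ e2, ?_⟩
          intro y hy hl
          rcases List.mem_append.1 hy with hy' | hy'
          · exact e3 y hy' hl
          · rw [List.mem_singleton.1 hy'] at hl
            exact absurd hl.symm (fun e => hb (e ▸ rfl))
      · intro y hy
        rw [hkeys_eq]
        rcases List.mem_append.1 hy with hy' | hy'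
        · exact h2 y hy'
        · rw [List.mem_singleton.1 hy']
          exact hq1 ▸ List.mem_map_of_mem (f := Prod.fst) hqmem
      · rw [hkeys_eq]; exact h3
    · rw [if_neg hlt]
      refine ⟨?_, ?_, ?_⟩
      · intro p hp
        obtain ⟨e1, e2, e3⟩ := h1 p hp
        refine ⟨e1, List.mem_append_left _ e2, ?_⟩
        intro y hy hl
        rcases List.mem_append.1 hy with hy' | hy'
        · exact e3 y hy' hl
        · rw [List.mem_singleton.1 hy'] at hl ⊢
          have hpq : p = q := by
            have := List.inj_on_of_nodup_map h3 hp hqmem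
            exact this (by rw [hq1, ← hl])
          rw [hpq, hq2]
          exact not_lt.1 hlt
      · intro y hy
        rcases List.mem_append.1 hy with hy' | hy'
        · exact h2 y hy'
        · rw [List.mem_singleton.1 hy']
          exact hq1 ▸ List.mem_map_of_mem (f := Prod.fst) hqmem
      · exact h3
theorem skey_inj : Function.Injective skey := by
  intro a b h
  have : (ofLex (skey a)).2 = (ofLex (skey b)).2 := by rw [h]
  simpa [skey] using this

theorem dinv_values_mem (xs : List String) (l : List (String × String))
    (h : DInv xs l) (v : String) :
    v ∈ l.map Prod.snd ↔ v ∈ xs ∧ KMin xs v := by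
  obtain ⟨h1, h2, h3⟩ := h
  constructor
  · intro hv
    rcases List.mem_map.1 hv with ⟨p, hp, hpe⟩
    obtain ⟨e1, e2, e3⟩ := h1 p hp
    subst hpe
    exact ⟨e2, fun y hy hl => e3 y hy (by rw [hl, e1])⟩
  · rintro ⟨hv, hmin⟩
    rcases List.mem_map.1 (h2 v hv) with ⟨p, hp, hpe⟩
    obtain ⟨e1, e2, e3⟩ := h1 p hp
    have hple : skey p.2 ≤ skey v := e3 v hv hpe.symm
    have hvle : skey v ≤ skey p.2 := hmin p.2 e2 (by rw [← e1, hpe])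
    have : p.2 = v := skey_inj (le_antisymm hple hvle)
    exact this ▸ List.mem_map_of_mem hp

theorem dinv_values_nodup (xs : List String) (l : List (String × String))
    (h : DInv xs l) : (l.map Prod.snd).Nodup := by
  obtain ⟨h1, _, h3⟩ := h
  have hmap : (l.map Prod.snd).map PySem.Str.lower = l.map Prod.fst := by
    rw [List.map_map]
    exact List.map_congr_left (fun p hp => ((h1 p hp).1).symm)
  exact (hmap ▸ h3).of_map

theorem foldA_eq_scanDedup (S : List String) (acc : List String) (seen : PySem.Set String) :
    (S.foldl
      (fun (st : List String × PySem.Set String) name =>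
        if PySem.Set.contains st.2 (PySem.Str.lower name) then st
        else (st.1 ++ [name], st.2.add (PySem.Str.lower name)))
      (acc, seen)).1 = acc ++ scanDedup seen S := by
  induction S generalizing acc seen with
  | nil => simp [scanDedup]
  | cons n t ih =>
    simp only [List.foldl_cons, scanDedup]
    by_cases h : PySem.Set.contains seen (PySem.Str.lower n) = true
    · rw [if_pos h, if_pos h]; exact ih acc seen
    · rw [if_neg h, if_neg h, ih]; simp

theorem scanDedup_sublist (seen : PySem.Set String) (S : List String) :
    (scanDedup seen S).Sublist S := by
  induction S generalizing seen with
  | nil => simp [scanDedup]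
  | cons n t ih =>
    simp only [scanDedup]
    by_cases h : PySem.Set.contains seen (PySem.Str.lower n) = true
    · rw [if_pos h]
      exact (ih seen).cons n
    · rw [if_neg h]
      exact (ih _).cons₂ n

theorem dinv_fold (xs : List String) (d : PySem.Dict String String) (pref : List String)
    (h : DInv pref d.items) : DInv (pref ++ xs) ((xs.foldl bstep d).items) := by
  induction xs generalizing d pref with
  | nil => simpa using h
  | cons n t ih =>
    have := ih (bstep d n) (pref ++ [n]) (dinv_step pref d n h)
    simpa using this

theorem main_eq (alias_list : List String) :
    clean_names_for_submission alias_list = clean_names_for_submission_alt alias_list := by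
  unfold clean_names_for_submission clean_names_for_submission_alt
  rw [foldA_eq_scanDedup, List.nil_append]
  have hSmem : ∀ y, y ∈ PySem.List.sorted (PySem.Set.ofList alias_list) skey false ↔ y ∈ alias_list := fun y => by
    rw [PySem.List.mem_sorted, PySem.Set.mem_ofList]
  have hSnd : (PySem.List.sorted (PySem.Set.ofList alias_list) skey false).Nodup :=
    (PySem.List.sorted_perm _ skey false).nodup_iff.mpr (PySem.Set.nodup_ofList alias_list)
  have hSpw : (PySem.List.sorted (PySem.Set.ofList alias_list) skey false).Pairwise (fun a b => skey a < skey b) := by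
    have hle := PySem.List.sorted_pairwise (PySem.Set.ofList alias_list) skey
    exact (hle.and hSnd).imp (fun h => lt_of_le_of_ne h.1 (fun e => h.2 (skey_inj e)))
  have hinv : DInv alias_list ((alias_list.foldl bstep PySem.Dict.empty).items) := by
    have h0 : DInv [] (PySem.Dict.empty : PySem.Dict String String).items := by
      refine ⟨?_, ?_, ?_⟩ <;> simp [PySem.Dict.empty]
    have := dinv_fold alias_list PySem.Dict.empty [] h0
    simpa using this
  have hBmem := dinv_values_mem alias_list _ hinv
  have hBnd := dinv_values_nodup alias_list _ hinv
  have hAmem : ∀ x, x ∈ scanDedup PySem.Set.empty (PySem.List.sorted (PySem.Set.ofList alias_list) skey false) ↔ x ∈ alias_list ∧ KMin alias_list x := by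
    intro x
    rw [scanDedup_mem _ PySem.Set.empty hSnd hSpw x]
    constructor
    · rintro ⟨h1, _, h3⟩
      exact ⟨(hSmem x).1 h1, fun y hy hl => h3 y ((hSmem y).2 hy) hl⟩
    · rintro ⟨h1, h2⟩
      refine ⟨(hSmem x).2 h1, ?_, fun y hy hl => h2 y ((hSmem y).1 hy) hl⟩
      simp [PySem.Set.empty]
  have hAnd : (scanDedup PySem.Set.empty (PySem.List.sorted (PySem.Set.ofList alias_list) skey false)).Nodup :=
    hSnd.sublist (scanDedup_sublist _ _)
  have hApw : (scanDedup PySem.Set.empty (PySem.List.sorted (PySem.Set.ofList alias_list) skey false)).Pairwise (fun a b => skey a < skey b) :=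
    List.Pairwise.sublist (scanDedup_sublist _ _) hSpw
  have hperm : (scanDedup PySem.Set.empty (PySem.List.sorted (PySem.Set.ofList alias_list) skey false)).Perm
      ((alias_list.foldl bstep PySem.Dict.empty).items.map Prod.snd) := by
    rw [List.perm_ext_iff_of_nodup hAnd hBnd]
    intro a
    rw [hAmem a, hBmem a]
  congr 1
  exact (PySem.List.sorted_eq_of_perm_of_pairwise_lt _ _ skey hperm hApw).symm

-- ===== VERDICT (by name: the statement is the Claim_ definition above) =====
theorem clean_names_for_submission_spec : Claim_equal_clean_names_for_submission := by
  intro alias_list _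
  unfold Spec_clean_names_for_submission
  exact main_eq alias_list
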